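-- pv_equiv track=rewrite | github.com/fawaz-dabbaghieh/PanPA | scripts/filter_sam_alignment_id.py | get_match_miss_md
-- ===== SOURCE A (Python) =====
-- def get_match_miss_md(md_string):
-- 	number = ""
-- 	matches = []
-- 	mismatches = 0
-- 	for c in md_string:
-- 		if c.isnumeric():
-- 			number += c
-- 		elif c == "^":  # deletion
-- 			if number:
-- 				matches.append(int(number))
-- 			number = ""
-- 			continue
-- 		else:
-- 			if number:
-- 				matches.append(int(number))
-- 			number = ""
-- 			mismatches += 1
-- 	if number:
-- 		matches.append(int(number))
-- 	return sum(matches), mismatches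
-- ===== SOURCE B (Python) =====
-- def get_match_miss_md(md_string):
--     # Run-length scan: an outer loop over maximal numeric runs (two-pointer inner
--     # scan) instead of A's char-by-char accumulate-and-flush state machine.
--     matches = 0
--     mismatches = 0
--     i = 0
--     n = len(md_string)
--     while i < n:
--         if md_string[i].isnumeric():
--             j = i + 1
--             while j < n and md_string[j].isnumeric():
--                 j += 1
--             matches += int(md_string[i:j])
--             i = j
--         else:
--             if md_string[i] != '^':
--                 mismatches += 1
--             i += 1
--     return matches, mismatches
-- ===== Notes on version B (the rewrite author's own statement) =====
-- stated objective: alternative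
-- what changed: Replaced A's char-by-char accumulate-and-flush state machine (building a digit string and a list of match counts) with a two-pointer run-length scan that consumes each maximal numeric run at once and adds its int value directly to a running total.
import Mathlib
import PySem

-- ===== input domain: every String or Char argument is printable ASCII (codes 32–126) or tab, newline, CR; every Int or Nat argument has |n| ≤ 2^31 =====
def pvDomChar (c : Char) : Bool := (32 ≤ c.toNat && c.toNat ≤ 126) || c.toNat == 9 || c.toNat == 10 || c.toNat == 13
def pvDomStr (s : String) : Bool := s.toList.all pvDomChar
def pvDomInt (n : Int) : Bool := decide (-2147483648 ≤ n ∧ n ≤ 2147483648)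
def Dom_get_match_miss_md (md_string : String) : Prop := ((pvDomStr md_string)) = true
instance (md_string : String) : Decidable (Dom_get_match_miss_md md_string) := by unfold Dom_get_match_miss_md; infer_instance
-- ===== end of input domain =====

-- B replaces A's accumulate-and-flush state machine with a run-length two-pointer scan; same O(n) cost, alternative structure.

-- c.isnumeric(): on the ASCII domain (Dom_) this is exactly '0'..'9', i.e. isdigit.
def pvIsNum (c : Char) : Bool := PySem.Chars.isdigit c

-- int(ds) for a nonempty digit run (the only way both programs call it); getD 0 only totalizes.
def pvVal (ds : List Char) : Int := (PySem.Int.ofChars? ds).getD 0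

-- ===== PORT A =====
def pvStepA (st : List Char × List Int × Int) (c : Char) : List Char × List Int × Int :=
  let number := st.1
  let ms := st.2.1
  let mismatches := st.2.2
  if pvIsNum c then (number ++ [c], ms, mismatches)
  else if c = '^' then
    ([], (if number = [] then ms else ms ++ [pvVal number]), mismatches)
  else
    ([], (if number = [] then ms else ms ++ [pvVal number]), mismatches + 1)

def get_match_miss_md (md_string : String) : Int × Int :=
  let r := md_string.toList.foldl pvStepA ([], [], 0)
  let ms := if r.1 = [] then r.2.1 else r.2.1 ++ [pvVal r.1]
  (ms.sum, r.2.2)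

-- ===== PORT B =====
-- outer loop over maximal numeric runs; the inner two-pointer scan is takeWhile/dropWhile
def pvGoB : List Char → Int → Int → Int × Int
  | [], m, mm => (m, mm)
  | c :: cs, m, mm =>
    if pvIsNum c then
      pvGoB (cs.dropWhile pvIsNum) (m + pvVal (c :: cs.takeWhile pvIsNum)) mm
    else
      pvGoB cs m (if c ≠ '^' then mm + 1 else mm)
termination_by cs => cs.length
decreasing_by
  · exact Nat.lt_succ_of_le (List.length_dropWhile_le _ _)
  · exact Nat.lt_succ_self _

def get_match_miss_md_alt (md_string : String) : Int × Int :=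
  pvGoB md_string.toList 0 0

-- ===== PRECONDITION & SPEC =====
def Spec_get_match_miss_md (md_string : String) (out : Int × Int) : Prop := out = get_match_miss_md_alt md_string
instance (md_string : String) (out : Int × Int) : Decidable (Spec_get_match_miss_md md_string out) := by unfold Spec_get_match_miss_md; infer_instance

-- ===== CLAIM (what is proved, stated in full; the proofs are below) =====
def Claim_equal_get_match_miss_md : Prop := ∀ (md_string : String), Dom_get_match_miss_md md_string → Spec_get_match_miss_md md_string (get_match_miss_md md_string)

-- ===== LEMMAS AND PROOFS =====

-- B's accumulators are linear
theorem pvGoB_acc : ∀ (n : Nat) (cs : List Char), cs.length ≤ n → ∀ m mm,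
    pvGoB cs m mm = (m + (pvGoB cs 0 0).1, mm + (pvGoB cs 0 0).2) := by
  intro n
  induction n with
  | zero =>
    intro cs h m mm
    have : cs = [] := List.eq_nil_of_length_eq_zero (Nat.le_zero.mp h)
    subst this; simp [pvGoB]
  | succ n ih =>
    intro cs h m mm
    cases cs with
    | nil => simp [pvGoB]
    | cons c cs' =>
      simp only [pvGoB]
      by_cases hc : pvIsNum c = true
      · simp only [hc, if_pos]
        have hlen : (cs'.dropWhile pvIsNum).length ≤ n :=
          le_trans (List.length_dropWhile_le _ _) (Nat.le_of_succ_le_succ h)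
        rw [ih _ hlen, ih _ hlen (0 + pvVal (c :: cs'.takeWhile pvIsNum)) 0]
        simp only [Prod.mk.injEq]
        constructor <;> ring
      · simp only [hc, if_neg, Bool.false_eq_true, not_false_iff]
        have hlen : cs'.length ≤ n := Nat.le_of_succ_le_succ h
        rw [ih _ hlen, ih _ hlen 0 (if c ≠ '^' then 0 + 1 else 0)]
        simp only [Prod.mk.injEq]
        split_ifs <;> constructor <;> ring

-- the take/drop shape of an all-digit prefix followed by a non-digit
theorem pvTW (p : Char → Bool) : ∀ (ds : List Char) (c : Char) (cs : List Char),
    (∀ d ∈ ds, p d = true) → p c = false →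
    (ds ++ c :: cs).takeWhile p = ds ∧ (ds ++ c :: cs).dropWhile p = c :: cs := by
  intro ds
  induction ds with
  | nil => intro c cs _ hc; simp [hc]
  | cons d ds ih =>
    intro c cs h hc
    have hd : p d = true := h d (by simp)
    have := ih c cs (fun x hx => h x (by simp [hx])) hc
    simp [hd, this.1, this.2]

-- an all-digit list feeds pvGoB as a single run
theorem pvGoB_digits (ds : List Char) (h : ∀ d ∈ ds, pvIsNum d = true) (hne : ds ≠ []) :
    pvGoB ds 0 0 = (pvVal ds, 0) := by
  cases ds with
  | nil => exact absurd rfl hne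
  | cons d ds' =>
    have hd : pvIsNum d = true := h d (by simp)
    have htw : ds'.takeWhile pvIsNum = ds' := List.takeWhile_eq_self_iff.mpr (fun x hx => h x (by simp [hx]))
    have hdw : ds'.dropWhile pvIsNum = [] := List.dropWhile_eq_nil_iff.mpr (fun x hx => h x (by simp [hx]))
    simp [pvGoB, hd, htw, hdw]

def pvFinish (st : List Char × List Int × Int) : Int × Int :=
  ((if st.1 = [] then st.2.1 else st.2.1 ++ [pvVal st.1]).sum, st.2.2)

theorem pvMain : ∀ (cs num : List Char) (ms : List Int) (mis : Int),
    (∀ d ∈ num, pvIsNum d = true) →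
    pvFinish (cs.foldl pvStepA (num, ms, mis)) =
      (ms.sum + (pvGoB (num ++ cs) 0 0).1, mis + (pvGoB (num ++ cs) 0 0).2) := by
  intro cs
  induction cs with
  | nil =>
    intro num ms mis h
    by_cases hne : num = []
    · subst hne; simp [pvFinish, pvGoB]
    · rw [List.append_nil, pvGoB_digits num h hne]
      simp [pvFinish, hne]
  | cons c cs' ih =>
    intro num ms mis h
    simp only [List.foldl_cons]
    by_cases hc : pvIsNum c = true
    · have hall : ∀ d ∈ num ++ [c], pvIsNum d = true := by
        intro d hd
        rcases List.mem_append.mp hd with h1 | h1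
        · exact h d h1
        · simp at h1; subst h1; exact hc
      have hstep : pvStepA (num, ms, mis) c = (num ++ [c], ms, mis) := by simp [pvStepA, hc]
      rw [hstep, ih (num ++ [c]) ms mis hall]
      simp
    · have hc' : pvIsNum c = false := by simpa using hc
      have hstep : pvStepA (num, ms, mis) c =
          ([], (if num = [] then ms else ms ++ [pvVal num]),
           if c = '^' then mis else mis + 1) := by
        have hcar : pvIsNum '^' = false := by decide
        by_cases h2 : c = '^' <;> simp [pvStepA, hc, h2, hcar]
      rw [hstep, ih [] _ _ (by intro d hd; simp at hd)]
      simp only [List.nil_append]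
      by_cases hne : num = []
      · subst hne
        simp only [List.nil_append]
        rw [show pvGoB (c :: cs') 0 0 = pvGoB cs' 0 (if c ≠ '^' then 0 + 1 else 0) by
              simp [pvGoB, hc]]
        rw [pvGoB_acc cs'.length cs' le_rfl 0 (if c ≠ '^' then 0 + 1 else 0)]
        by_cases h2 : c = '^' <;> refine Prod.ext ?_ ?_ <;> simp [h2] <;> ring
      · obtain ⟨htw, hdw⟩ := pvTW pvIsNum num c cs' h hc'
        cases num with
        | nil => exact absurd rfl hne
        | cons d ds =>
          have hd : pvIsNum d = true := h d (by simp)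
          have htw' : (ds ++ c :: cs').takeWhile pvIsNum = ds := by
            have := pvTW pvIsNum ds c cs' (fun x hx => h x (by simp [hx])) hc'
            exact this.1
          have hdw' : (ds ++ c :: cs').dropWhile pvIsNum = c :: cs' := by
            have := pvTW pvIsNum ds c cs' (fun x hx => h x (by simp [hx])) hc'
            exact this.2
          rw [show ((d :: ds) ++ c :: cs') = d :: (ds ++ c :: cs') by simp]
          rw [show pvGoB (d :: (ds ++ c :: cs')) 0 0
                = pvGoB (c :: cs') (0 + pvVal (d :: ds)) 0 by
              simp [pvGoB, hd, htw', hdw']]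
          rw [show pvGoB (c :: cs') (0 + pvVal (d :: ds)) 0
                = pvGoB cs' (0 + pvVal (d :: ds)) (if c ≠ '^' then 0 + 1 else 0) by
              simp [pvGoB, hc]]
          rw [pvGoB_acc cs'.length cs' le_rfl (0 + pvVal (d :: ds)) (if c ≠ '^' then 0 + 1 else 0)]
          by_cases h2 : c = '^' <;> refine Prod.ext ?_ ?_ <;> simp [h2, hne] <;> ring

-- ===== VERDICT (by name: the statement is the Claim_ definition above) =====
theorem get_match_miss_md_spec : Claim_equal_get_match_miss_md := by
  intro s _
  unfold Spec_get_match_miss_md get_match_miss_md get_match_miss_md_alt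
  have := pvMain s.toList [] [] 0 (by intro d hd; simp at hd)
  simp only [List.nil_append] at this
  simp only [pvFinish] at this
  rw [this]
  simp
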